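-- pv_equiv track=rewrite | github.com/bobmatnyc/jjf-survey-analytics | report_generator.py | _build_aggregate_breakdown
-- ===== SOURCE A (Python) =====
-- from typing import Any, Dict, List, Optional
--
-- def _build_aggregate_breakdown(
--     ceo_data: List[Dict], tech_data: List[Dict], staff_data: List[Dict]
-- ) -> Dict[str, Any]:
--     """Build aggregate breakdown by survey type."""
--     return {
--         "by_survey_type": {
--             "CEO": {
--                 "completed": len([r for r in ceo_data if r.get("Date")]),
--                 "pending": len([r for r in ceo_data if not r.get("Date")]),
--                 "total_responses": sum(
--                     len([k for k in r.keys() if k.startswith("C-")])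
--                     for r in ceo_data
--                     if r.get("Date")
--                 ),
--             },
--             "Tech Lead": {
--                 "completed": len([r for r in tech_data if r.get("Date")]),
--                 "pending": len([r for r in tech_data if not r.get("Date")]),
--                 "total_responses": sum(
--                     len([k for k in r.keys() if k.startswith("TL-")])
--                     for r in tech_data
--                     if r.get("Date")
--                 ),
--             },
--             "Staff": {
--                 "completed": len([r for r in staff_data if r.get("Date")]),
--                 "pending": len([r for r in staff_data if not r.get("Date")]),
--                 "total_responses": sum(
--                     len([k for k in r.keys() if k.startswith("S-")])
--                     for r in staff_data
--                     if r.get("Date")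
--                 ),
--             },
--         }
--     }
-- ===== SOURCE B (Python) =====
-- def _build_aggregate_breakdown(ceo_data, tech_data, staff_data):
--     def count_block(data, prefix):
--         completed = pending = total = 0
--         for r in data:
--             if r.get("Date"):
--                 completed += 1
--                 total += sum(1 for k in r if k.startswith(prefix))
--             else:
--                 pending += 1
--         return {"completed": completed, "pending": pending, "total_responses": total}
--
--     return {
--         "by_survey_type": {
--             "CEO": count_block(ceo_data, "C-"),
--             "Tech Lead": count_block(tech_data, "TL-"),
--             "Staff": count_block(staff_data, "S-"),
--         }
--     }
-- ===== Notes on version B (the rewrite author's own statement) =====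
-- stated objective: simpler
-- what changed: Replaces A's three separate comprehension scans per survey list (and the thrice-copied block) with one shared helper count_block that makes a single accumulating pass per list, counting completed/pending and summing matching keys as it goes.
import Mathlib
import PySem

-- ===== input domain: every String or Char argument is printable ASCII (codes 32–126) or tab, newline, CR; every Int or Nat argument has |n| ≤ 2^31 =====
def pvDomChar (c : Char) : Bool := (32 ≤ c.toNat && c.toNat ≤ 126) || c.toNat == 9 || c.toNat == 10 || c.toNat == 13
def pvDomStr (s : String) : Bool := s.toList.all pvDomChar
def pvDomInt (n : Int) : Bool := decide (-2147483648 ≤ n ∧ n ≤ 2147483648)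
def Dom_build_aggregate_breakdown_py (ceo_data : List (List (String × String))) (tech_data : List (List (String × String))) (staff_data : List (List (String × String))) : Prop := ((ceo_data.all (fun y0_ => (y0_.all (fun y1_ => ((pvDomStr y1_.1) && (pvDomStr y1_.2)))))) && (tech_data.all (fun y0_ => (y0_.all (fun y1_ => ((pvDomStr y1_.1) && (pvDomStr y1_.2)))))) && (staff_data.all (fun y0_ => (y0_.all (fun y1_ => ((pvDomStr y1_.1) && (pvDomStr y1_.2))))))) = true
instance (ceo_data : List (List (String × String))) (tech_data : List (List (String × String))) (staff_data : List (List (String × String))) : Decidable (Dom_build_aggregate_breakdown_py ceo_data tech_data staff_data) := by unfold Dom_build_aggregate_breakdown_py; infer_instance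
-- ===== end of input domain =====

-- B replaces A's three separate comprehension scans per survey list (written out three times)
-- with one shared helper making a single accumulating pass per list (objective: simpler).

-- r.get("Date") truthiness: the looked-up string is truthy iff present and nonempty.
def pvDate (r : List (String × String)) : Bool :=
  match (PySem.Dict.ofList r).get? "Date" with
  | some s => !(s == "")
  | none => false

-- ===== PORT A =====
def build_aggregate_breakdown_py (ceo_data : List (List (String × String))) (tech_data : List (List (String × String))) (staff_data : List (List (String × String))) : List (String × List (String × List (String × Int))) :=
  [("by_survey_type",
    [("CEO",
       [("completed", ((ceo_data.filter (fun r => pvDate r)).length : Int)),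
        ("pending", ((ceo_data.filter (fun r => !pvDate r)).length : Int)),
        ("total_responses",
          (((ceo_data.filter (fun r => pvDate r)).map
            (fun r => (((PySem.Dict.ofList r).keys.filter (fun k => PySem.Str.startswith k "C-")).length : Int))).sum))]),
     ("Tech Lead",
       [("completed", ((tech_data.filter (fun r => pvDate r)).length : Int)),
        ("pending", ((tech_data.filter (fun r => !pvDate r)).length : Int)),
        ("total_responses",
          (((tech_data.filter (fun r => pvDate r)).map
            (fun r => (((PySem.Dict.ofList r).keys.filter (fun k => PySem.Str.startswith k "TL-")).length : Int))).sum))]),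
     ("Staff",
       [("completed", ((staff_data.filter (fun r => pvDate r)).length : Int)),
        ("pending", ((staff_data.filter (fun r => !pvDate r)).length : Int)),
        ("total_responses",
          (((staff_data.filter (fun r => pvDate r)).map
            (fun r => (((PySem.Dict.ofList r).keys.filter (fun k => PySem.Str.startswith k "S-")).length : Int))).sum))])])]

-- ===== PORT B =====
-- one accumulating pass: (completed, pending, total_responses)
def pvBStep (pre : String) (acc : Int × Int × Int) (r : List (String × String)) : Int × Int × Int :=
  if pvDate r then
    (acc.1 + 1, acc.2.1,
     acc.2.2 + ((PySem.Dict.ofList r).keys.countP (fun k => PySem.Str.startswith k pre) : Int))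
  else
    (acc.1, acc.2.1 + 1, acc.2.2)

def pvCountBlock (data : List (List (String × String))) (pre : String) : List (String × Int) :=
  let t := data.foldl (pvBStep pre) (0, 0, 0)
  [("completed", t.1), ("pending", t.2.1), ("total_responses", t.2.2)]

def build_aggregate_breakdown_py_alt (ceo_data : List (List (String × String))) (tech_data : List (List (String × String))) (staff_data : List (List (String × String))) : List (String × List (String × List (String × Int))) :=
  [("by_survey_type",
    [("CEO", pvCountBlock ceo_data "C-"),
     ("Tech Lead", pvCountBlock tech_data "TL-"),
     ("Staff", pvCountBlock staff_data "S-")])]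

-- ===== PRECONDITION & SPEC =====
def Spec_build_aggregate_breakdown_py (ceo_data : List (List (String × String))) (tech_data : List (List (String × String))) (staff_data : List (List (String × String))) (out : List (String × List (String × List (String × Int)))) : Prop := out = build_aggregate_breakdown_py_alt ceo_data tech_data staff_data
instance (ceo_data : List (List (String × String))) (tech_data : List (List (String × String))) (staff_data : List (List (String × String))) (out : List (String × List (String × List (String × Int)))) : Decidable (Spec_build_aggregate_breakdown_py ceo_data tech_data staff_data out) := by unfold Spec_build_aggregate_breakdown_py; infer_instance

-- ===== CLAIM (what is proved, stated in full; the proofs are below) =====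
def Claim_equal_build_aggregate_breakdown_py : Prop := ∀ (ceo_data : List (List (String × String))) (tech_data : List (List (String × String))) (staff_data : List (List (String × String))), Dom_build_aggregate_breakdown_py ceo_data tech_data staff_data → Spec_build_aggregate_breakdown_py ceo_data tech_data staff_data (build_aggregate_breakdown_py ceo_data tech_data staff_data)

-- ===== LEMMAS AND PROOFS =====

-- the accumulating pass, from an arbitrary start, computes A's three counts
lemma pvFold_gen (pre : String) (data : List (List (String × String))) :
    ∀ c p t : Int, data.foldl (pvBStep pre) (c, p, t) =
      (c + ((data.filter (fun r => pvDate r)).length : Int),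
       p + ((data.filter (fun r => !pvDate r)).length : Int),
       t + ((data.filter (fun r => pvDate r)).map
         (fun r => (((PySem.Dict.ofList r).keys.filter (fun k => PySem.Str.startswith k pre)).length : Int))).sum) := by
  induction data with
  | nil => intro c p t; simp
  | cons r rest ih =>
    intro c p t
    simp only [List.foldl_cons, pvBStep]
    split_ifs with h <;>
      simp [ih, h, List.countP_eq_length_filter] <;> omega

theorem pvBlock_eq (pre : String) (data : List (List (String × String))) :
    pvCountBlock data pre =
      [("completed", ((data.filter (fun r => pvDate r)).length : Int)),
       ("pending", ((data.filter (fun r => !pvDate r)).length : Int)),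
       ("total_responses",
         ((data.filter (fun r => pvDate r)).map
           (fun r => (((PySem.Dict.ofList r).keys.filter (fun k => PySem.Str.startswith k pre)).length : Int))).sum)] := by
  simp [pvCountBlock, pvFold_gen]

-- ===== VERDICT (by name: the statement is the Claim_ definition above) =====
theorem build_aggregate_breakdown_py_spec : Claim_equal_build_aggregate_breakdown_py := by
  intro ceo tech staff _
  show _ = _
  simp [build_aggregate_breakdown_py, build_aggregate_breakdown_py_alt, pvBlock_eq]
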